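-- pv_equiv track=rewrite | github.com/Zion-Holdings/zion.app | workflow_recovery_system.py | detect_corruption_pattern
-- ===== SOURCE A (Python) =====
-- def detect_corruption_pattern(content, error_msg):
--     """Detect the specific corruption pattern in a file"""
--     lines = content.split('\n')
--
--     # Pattern 1: Missing runs-on and steps sections
--     if 'jobs:' in content and 'runs-on:' not in content:
--         return 'missing_structure'
--
--     # Pattern 2: Malformed step properties
--     if any(line.strip().startswith('- uses:') or
--            line.strip().startswith('- run:') or
--            line.strip().startswith('- with:') for line in lines):
--         return 'malformed_steps'
--
--     # Pattern 3: Missing step context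
--     if any(line.strip().startswith('uses:') or
--            line.strip().startswith('run:') or
--            line.strip().startswith('with:') for line in lines):
--         if not any(line.strip().startswith('      ') for line in lines):
--             return 'missing_step_context'
--
--     # Pattern 4: Malformed job properties
--     if any(line.strip().startswith('- runs-on:') or
--            line.strip().startswith('- timeout-minutes:') or
--            line.strip().startswith('- needs:') for line in lines):
--         return 'malformed_job_properties'
--
--     # Pattern 5: Stray content
--     if 'contents: write' in content:
--         return 'stray_content'
--
--     return 'unknown'
-- ===== SOURCE B (Python) =====
-- def _starts_line(content, prefix):
--     """True iff some line of `content`, after stripping, starts with `prefix`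
--     (prefix begins and ends with non-whitespace): single character-level scan
--     over the raw text tracking whether we are still in a line's leading whitespace."""
--     at_head = True
--     for i, c in enumerate(content):
--         if at_head and content.startswith(prefix, i):
--             return True
--         if c == '\n':
--             at_head = True
--         elif not c.isspace():
--             at_head = False
--     return False
--
--
-- def detect_corruption_pattern(content, error_msg):
--     """Detect the specific corruption pattern in a file"""
--     if 'jobs:' in content and 'runs-on:' not in content:
--         return 'missing_structure'
--     if _starts_line(content, '- uses:') or _starts_line(content, '- run:') or _starts_line(content, '- with:'):
--         return 'malformed_steps'
--     # a stripped line can never start with whitespace, so A's inner six-space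
--     # guard is vacuously passed and is dropped here
--     if _starts_line(content, 'uses:') or _starts_line(content, 'run:') or _starts_line(content, 'with:'):
--         return 'missing_step_context'
--     if _starts_line(content, '- runs-on:') or _starts_line(content, '- timeout-minutes:') or _starts_line(content, '- needs:'):
--         return 'malformed_job_properties'
--     if 'contents: write' in content:
--         return 'stray_content'
--     return 'unknown'
-- ===== Notes on version B (the rewrite author's own statement) =====
-- stated objective: alternative
-- what changed: B never splits the content into lines or strips them: each prefix check is a character-level state machine over the raw text that tracks whether the scan is still inside a line's leading whitespace and does a positional startswith there, and A's always-false six-space indent guard is dropped (a stripped line cannot start with whitespace).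
import Mathlib
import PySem

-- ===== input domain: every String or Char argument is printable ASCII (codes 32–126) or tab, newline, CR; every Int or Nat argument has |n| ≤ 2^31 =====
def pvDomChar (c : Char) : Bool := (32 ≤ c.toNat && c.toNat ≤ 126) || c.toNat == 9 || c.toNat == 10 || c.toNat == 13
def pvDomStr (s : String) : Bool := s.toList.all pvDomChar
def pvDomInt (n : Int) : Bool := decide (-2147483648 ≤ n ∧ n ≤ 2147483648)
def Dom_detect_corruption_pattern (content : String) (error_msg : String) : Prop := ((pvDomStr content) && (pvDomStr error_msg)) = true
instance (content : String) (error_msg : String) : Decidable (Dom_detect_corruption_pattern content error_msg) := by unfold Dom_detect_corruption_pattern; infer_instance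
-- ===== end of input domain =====

-- B replaces A's split-into-lines + strip + startswith scans by a character-level
-- state machine over the raw content (positional prefix match at line heads) and
-- drops A's vacuous six-space indent guard (a stripped line never starts with whitespace).

-- ===== PORT A =====
-- A's line predicates, one per any() scan
def pvAStep (line : String) : Bool :=
  PySem.Str.startswith (PySem.Str.strip line) "- uses:" ||
  PySem.Str.startswith (PySem.Str.strip line) "- run:" ||
  PySem.Str.startswith (PySem.Str.strip line) "- with:"

def pvABare (line : String) : Bool :=
  PySem.Str.startswith (PySem.Str.strip line) "uses:" ||
  PySem.Str.startswith (PySem.Str.strip line) "run:" ||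
  PySem.Str.startswith (PySem.Str.strip line) "with:"

def pvAIndent (line : String) : Bool :=
  PySem.Str.startswith (PySem.Str.strip line) "      "

def pvAJob (line : String) : Bool :=
  PySem.Str.startswith (PySem.Str.strip line) "- runs-on:" ||
  PySem.Str.startswith (PySem.Str.strip line) "- timeout-minutes:" ||
  PySem.Str.startswith (PySem.Str.strip line) "- needs:"

-- patterns 4 and 5 (reached from two places in A's control flow)
def pvATail (content : String) (lines : List String) : String :=
  if lines.any pvAJob then "malformed_job_properties"
  else if PySem.Str.isIn "contents: write" content then "stray_content"
  else "unknown"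

def detect_corruption_pattern (content : String) (error_msg : String) : String :=
  let lines := (PySem.Str.split? content "\n").getD []
  if PySem.Str.isIn "jobs:" content && !(PySem.Str.isIn "runs-on:" content) then
    "missing_structure"
  else if lines.any pvAStep then "malformed_steps"
  else if lines.any pvABare then
    if !(lines.any pvAIndent) then "missing_step_context"
    else pvATail content lines
  else pvATail content lines

-- ===== PORT B =====
-- _starts_line's loop: one pass over the characters, `head` = still in the
-- line's leading whitespace; positional startswith check at each head position
def pvScanP (p : List Char) : List Char → Bool → Bool
  | [], _ => false
  | c :: cs, head =>
    if head && PySem.Chars.startswith (c :: cs) p then true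
    else pvScanP p cs (if c = '\n' then true else if PySem.Chars.isspace c then head else false)

def pvStartsLine (content : String) (pfx : String) : Bool :=
  pvScanP pfx.toList content.toList true

def detect_corruption_pattern_alt (content : String) (error_msg : String) : String :=
  if PySem.Str.isIn "jobs:" content && !(PySem.Str.isIn "runs-on:" content) then
    "missing_structure"
  else if pvStartsLine content "- uses:" || pvStartsLine content "- run:" ||
      pvStartsLine content "- with:" then "malformed_steps"
  else if pvStartsLine content "uses:" || pvStartsLine content "run:" ||
      pvStartsLine content "with:" then "missing_step_context"
  else if pvStartsLine content "- runs-on:" || pvStartsLine content "- timeout-minutes:" ||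
      pvStartsLine content "- needs:" then "malformed_job_properties"
  else if PySem.Str.isIn "contents: write" content then "stray_content"
  else "unknown"

-- ===== PRECONDITION & SPEC =====
def Spec_detect_corruption_pattern (content : String) (error_msg : String) (out : String) : Prop := out = detect_corruption_pattern_alt content error_msg
instance (content : String) (error_msg : String) (out : String) : Decidable (Spec_detect_corruption_pattern content error_msg out) := by unfold Spec_detect_corruption_pattern; infer_instance

-- ===== CLAIM (what is proved, stated in full; the proofs are below) =====
def Claim_equal_detect_corruption_pattern : Prop := ∀ (content : String) (error_msg : String), Dom_detect_corruption_pattern content error_msg → Spec_detect_corruption_pattern content error_msg (detect_corruption_pattern content error_msg)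

-- ===== LEMMAS AND PROOFS =====

-- prepend x to the first piece (the shape splitOn.go accumulates)
def pvConsHead (x : List Char) : List (List Char) → List (List Char)
  | [] => [x]
  | h :: t => (x ++ h) :: t

-- the lines of cs (split on '\n'), as a clean structural recursion
def pvLines : List Char → List (List Char)
  | [] => [[]]
  | c :: cs => if c = '\n' then [] :: pvLines cs else pvConsHead [c] (pvLines cs)

theorem pvConsHead_consHead (a b : List Char) (ls : List (List Char)) :
    pvConsHead a (pvConsHead b ls) = pvConsHead (a ++ b) ls := by
  cases ls <;> simp [pvConsHead]

theorem pvLines_newline (cs : List Char) : pvLines ('\n' :: cs) = [] :: pvLines cs := by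
  simp [pvLines]

theorem pvLines_cons_of_ne (c : Char) (cs : List Char) (h : c ≠ '\n') :
    pvLines (c :: cs) = pvConsHead [c] (pvLines cs) := by
  simp [pvLines, h]

theorem pvLines_ex (cs : List Char) :
    ∃ t, pvLines cs = cs.takeWhile (· ≠ '\n') :: t := by
  induction cs with
  | nil => exact ⟨[], by simp [pvLines]⟩
  | cons c cs ih =>
    by_cases h : c = '\n'
    · exact ⟨pvLines cs, by simp [pvLines, h]⟩
    · obtain ⟨t, ht⟩ := ih
      exact ⟨t, by
        rw [pvLines, if_neg h, ht, List.takeWhile_cons_of_pos (by simpa using h)]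
        simp [pvConsHead]⟩

theorem pvLines_ne_nil (cs : List Char) : pvLines cs ≠ [] := by
  obtain ⟨t, ht⟩ := pvLines_ex cs
  simp [ht]

theorem pvConsHead_nil (ls : List (List Char)) (h : ls ≠ []) : pvConsHead [] ls = ls := by
  cases ls with
  | nil => exact absurd rfl h
  | cons a t => simp [pvConsHead]

theorem pvSplitGo_eq (fuel : Nat) :
    ∀ (l cur : List Char) (acc : List (List Char)), l.length ≤ fuel →
      PySem.Chars.splitOn.go ['\n'] fuel l cur acc
        = acc.reverse ++ pvConsHead cur.reverse (pvLines l) := by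
  induction fuel with
  | zero =>
    intro l cur acc h
    have hl : l = [] := by cases l <;> simp_all
    subst hl
    simp [PySem.Chars.splitOn.go, pvLines, pvConsHead]
  | succ fuel ih =>
    intro l cur acc h
    cases l with
    | nil => simp [PySem.Chars.splitOn.go, pvLines, pvConsHead]
    | cons c rest =>
      by_cases hc : c = '\n'
      · subst hc
        rw [show PySem.Chars.splitOn.go ['\n'] (fuel+1) ('\n' :: rest) cur acc
            = PySem.Chars.splitOn.go ['\n'] fuel rest [] (cur.reverse :: acc) by
          simp [PySem.Chars.splitOn.go, List.isPrefixOf]]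
        rw [ih rest [] (cur.reverse :: acc) (by simpa using Nat.le_of_succ_le_succ h)]
        rw [pvLines_newline, List.reverse_nil, pvConsHead_nil _ (pvLines_ne_nil rest)]
        simp [pvConsHead]
      · rw [show PySem.Chars.splitOn.go ['\n'] (fuel+1) (c :: rest) cur acc
            = PySem.Chars.splitOn.go ['\n'] fuel rest (c :: cur) acc by
          simp [PySem.Chars.splitOn.go, List.isPrefixOf, Ne.symm hc]]
        rw [ih rest (c :: cur) acc (by simpa using Nat.le_of_succ_le_succ h)]
        rw [pvLines_cons_of_ne c rest hc, pvConsHead_consHead]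
        simp

theorem pvSplitOn_newline (cs : List Char) :
    PySem.Chars.splitOn cs ['\n'] = pvLines cs := by
  rw [PySem.Chars.splitOn, pvSplitGo_eq (cs.length + 1) cs [] [] (by omega)]
  simp [pvConsHead_nil _ (pvLines_ne_nil cs)]

-- A's line list is pvLines of the characters
theorem pvALines_eq (content : String) :
    (PySem.Str.split? content "\n").getD [] = (pvLines content.toList).map String.ofList := by
  rw [PySem.Str.split?, show ("\n" : String).toList = ['\n'] from rfl,
      PySem.Chars.split?, if_neg (by decide), pvSplitOn_newline]
  rfl

-- head of lstrip is never whitespace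
theorem pvLstrip_head (l : List Char) (c : Char) (r : List Char)
    (h : PySem.Chars.lstrip l = c :: r) : PySem.Chars.isspace c = false := by
  induction l with
  | nil => simp [PySem.Chars.lstrip] at h
  | cons a t ih =>
    by_cases ha : PySem.Chars.isspace a
    · exact ih (by rwa [PySem.Chars.lstrip, List.dropWhile_cons_of_pos ha] at h)
    · rw [PySem.Chars.lstrip, List.dropWhile_cons_of_neg ha] at h
      cases h; simpa using ha

-- rstrip decomposition: s = rstrip s ++ (all-whitespace tail)
theorem pvRstrip_decomp (s : List Char) :
    ∃ d, s = PySem.Chars.rstrip s ++ d ∧ ∀ c ∈ d, PySem.Chars.isspace c = true := by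
  refine ⟨(s.reverse.takeWhile PySem.Chars.isspace).reverse, ?_, ?_⟩
  · rw [PySem.Chars.rstrip]
    rw [← List.reverse_append, List.takeWhile_append_dropWhile, List.reverse_reverse]
  · intro c hc
    exact List.mem_takeWhile_imp (List.mem_reverse.mp hc)

theorem pvRstrip_prefix (s : List Char) : PySem.Chars.rstrip s <+: s := by
  obtain ⟨d, hd, -⟩ := pvRstrip_decomp s
  exact ⟨d, hd.symm⟩

-- p with non-whitespace last char is a prefix of rstrip s iff of s
theorem pvPrefix_rstrip (p s : List Char) (hne : p ≠ [])
    (hlast : PySem.Chars.isspace (p.getLast hne) = false) :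
    p <+: PySem.Chars.rstrip s ↔ p <+: s := by
  constructor
  · intro h; exact h.trans (pvRstrip_prefix s)
  · intro h
    obtain ⟨d, hd, hws⟩ := pvRstrip_decomp s
    rcases List.prefix_or_prefix_of_prefix h (pvRstrip_prefix s) with h1 | h2
    · exact h1
    · obtain ⟨p', hp'⟩ := h2
      cases p' with
      | nil => simpa [← hp'] using h2
      | cons x xs =>
        exfalso
        obtain ⟨q, hq⟩ := h
        rw [hd, ← hp', List.append_assoc] at hq
        have hx : (x :: xs) ++ q = d := List.append_cancel_left hq
        subst hp'
        have hxs : (x :: xs : List Char) ≠ [] := by simp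
        rw [List.getLast_append_of_ne_nil hne hxs] at hlast
        have hmem : (x :: xs).getLast hxs ∈ (x :: xs) ++ q :=
          List.mem_append_left _ (List.getLast_mem _)
        rw [hx] at hmem
        rw [hws _ hmem] at hlast; cases hlast

-- the scanner's per-line predicate
def pvP (p : List Char) (l : List Char) : Bool :=
  PySem.Chars.startswith (PySem.Chars.strip l) p

theorem pvStrip_cons_space (c : Char) (h : List Char) (hc : PySem.Chars.isspace c = true) :
    PySem.Chars.strip (c :: h) = PySem.Chars.strip h := by
  rw [PySem.Chars.strip, PySem.Chars.strip, PySem.Chars.lstrip, PySem.Chars.lstrip,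
    List.dropWhile_cons_of_pos hc]

theorem pvP_cons_space (p : List Char) (c : Char) (h : List Char)
    (hc : PySem.Chars.isspace c = true) : pvP p (c :: h) = pvP p h := by
  rw [pvP, pvP, pvStrip_cons_space c h hc]

theorem pvP_nil (p : List Char) (hne : p ≠ []) : pvP p [] = false := by
  cases p with
  | nil => exact absurd rfl hne
  | cons a q => simp [pvP, PySem.Chars.strip, PySem.Chars.lstrip, PySem.Chars.rstrip,
      PySem.Chars.startswith, List.isPrefixOf]

-- for a line starting with a non-whitespace char, pvP is plain prefix
theorem pvP_cons_nonspace (p : List Char) (hne : p ≠ [])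
    (hlast : PySem.Chars.isspace (p.getLast hne) = false)
    (c : Char) (h : List Char) (hc : PySem.Chars.isspace c = false) :
    pvP p (c :: h) = decide (p <+: c :: h) := by
  rw [pvP, PySem.Chars.strip, PySem.Chars.lstrip, List.dropWhile_cons_of_neg (by simp [hc])]
  rw [PySem.Chars.startswith]
  by_cases hp : p <+: c :: h
  · simp [hp, List.isPrefixOf_iff_prefix, (pvPrefix_rstrip p (c :: h) hne hlast).mpr hp]
  · simp only [hp, decide_false]
    by_cases hp2 : p <+: PySem.Chars.rstrip (c :: h)
    · exact absurd ((pvPrefix_rstrip p (c :: h) hne hlast).mp hp2) hp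
    · exact Bool.eq_false_iff.mpr (fun hb => hp2 (List.isPrefixOf_iff_prefix.mp hb))

-- a prefix without '\n' is a prefix of the first line
theorem pvPrefix_takeWhile (p : List Char) (hnl : '\n' ∉ p) :
    ∀ s, p <+: s → p <+: s.takeWhile (· ≠ '\n') := by
  induction p with
  | nil => intro s _; exact List.nil_prefix
  | cons a q ih =>
    intro s hp
    obtain ⟨r, hr⟩ := hp
    cases s with
    | nil => simp at hr
    | cons b t =>
      obtain ⟨rfl, ht⟩ : a = b ∧ q ++ r = t := by
        constructor
        · exact (List.cons.injEq _ _ _ _ ▸ hr).1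
        · exact (List.cons.injEq _ _ _ _ ▸ hr).2
      have ha : a ≠ '\n' := fun h => hnl (h ▸ List.mem_cons_self)
      rw [List.takeWhile_cons_of_pos (by simpa using ha)]
      have hq := ih (fun h => hnl (List.mem_cons_of_mem _ h)) t ⟨r, ht⟩
      exact (List.prefix_cons_inj a).mpr hq

-- dead guard: a stripped line never starts with six spaces
theorem pvIndent_false (l : List Char) :
    PySem.Chars.startswith (PySem.Chars.strip l) ("      ".toList) = false := by
  rw [PySem.Chars.startswith]
  by_cases h : ("      ".toList) <+: PySem.Chars.strip l
  · exfalso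
    have hsub : PySem.Chars.strip l <+: PySem.Chars.lstrip l := by
      rw [PySem.Chars.strip]; exact pvRstrip_prefix _
    obtain ⟨r, hr⟩ := h.trans hsub
    have hsp : PySem.Chars.isspace ' ' = false :=
      pvLstrip_head l ' ' _ (by rw [← hr]; rfl)
    simp [PySem.Chars.isspace] at hsp
  · exact Bool.eq_false_iff.mpr (fun hb => h (List.isPrefixOf_iff_prefix.mp hb))

-- MAIN: the character-level scanner equals "some line, stripped, starts with p"
theorem pvScan_eq (a : Char) (q : List Char)
    (ha : PySem.Chars.isspace a = false) (hnl : '\n' ∉ a :: q)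
    (hlast : PySem.Chars.isspace ((a :: q).getLast (by simp)) = false) :
    ∀ cs : List Char,
      pvScanP (a :: q) cs true = (pvLines cs).any (pvP (a :: q)) ∧
      pvScanP (a :: q) cs false = ((pvLines cs).tail).any (pvP (a :: q)) := by
  have hne : (a :: q : List Char) ≠ [] := by simp
  intro cs
  induction cs with
  | nil =>
    constructor <;> simp [pvScanP, pvLines, pvP_nil _ hne]
  | cons c cs ih =>
    obtain ⟨t, ht⟩ := pvLines_ex cs
    constructor
    · -- head = true
      rw [pvScanP]
      by_cases hm : PySem.Chars.startswith (c :: cs) (a :: q)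
      · have hp : (a :: q) <+: c :: cs := by
          rw [PySem.Chars.startswith, List.isPrefixOf_iff_prefix] at hm; exact hm
        have hc : c = a := by
          obtain ⟨r, hr⟩ := hp
          exact ((List.cons.injEq _ _ _ _ ▸ hr).1).symm
        have hcnl : ¬ c = '\n' := by
          rw [hc]; exact fun h => hnl (h ▸ List.mem_cons_self)
        rw [if_pos (by simp [hm])]
        rw [pvLines_cons_of_ne c cs hcnl, ht]
        have hfirst : (a :: q) <+: (c :: cs).takeWhile (· ≠ '\n') :=
          pvPrefix_takeWhile _ hnl _ hp
        rw [List.takeWhile_cons_of_pos (by simpa using hcnl)] at hfirst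
        simp only [pvConsHead, List.singleton_append, List.any_cons]
        have hP : pvP (a :: q) (c :: cs.takeWhile (· ≠ '\n')) = true := by
          rw [pvP_cons_nonspace _ hne hlast c _ (hc ▸ ha)]
          simpa using hfirst
        rw [hP]
        simp
      · rw [if_neg (by simp [hm])]
        by_cases hcn : c = '\n'
        · subst hcn
          rw [if_pos rfl, pvLines_newline]
          simp only [List.any_cons, pvP_nil _ hne, Bool.false_or]
          exact ih.1
        · rw [if_neg hcn]
          by_cases hcs : PySem.Chars.isspace c
          · rw [if_pos hcs, pvLines_cons_of_ne c cs hcn, ht]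
            simp only [pvConsHead, List.singleton_append, List.any_cons]
            rw [pvP_cons_space _ c _ hcs, ih.1, ht]
            simp
          · rw [if_neg hcs, pvLines_cons_of_ne c cs hcn, ht]
            simp only [pvConsHead, List.singleton_append, List.any_cons]
            have hPfalse : pvP (a :: q) (c :: cs.takeWhile (· ≠ '\n')) = false := by
              rw [pvP_cons_nonspace _ hne hlast c _ (by simpa using hcs)]
              simp only [decide_eq_false_iff_not]
              intro hpre
              have hcc : (a :: q) <+: c :: cs := by
                have htw : (c :: cs.takeWhile (· ≠ '\n')) <+: c :: cs :=
                  (List.prefix_cons_inj c).mpr (List.takeWhile_prefix _)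
                exact hpre.trans htw
              rw [PySem.Chars.startswith, List.isPrefixOf_iff_prefix] at hm
              exact hm hcc
            rw [hPfalse, Bool.false_or, ih.2, ht]
            simp
    · -- head = false
      rw [pvScanP, if_neg (by simp)]
      by_cases hcn : c = '\n'
      · subst hcn
        rw [if_pos rfl, pvLines_newline]
        simpa using ih.1
      · rw [if_neg hcn, pvLines_cons_of_ne c cs hcn, ht]
        simp only [pvConsHead, List.singleton_append, List.tail_cons]
        have hflag : (if PySem.Chars.isspace c then false else false) = false := by
          split <;> rfl
        rw [hflag, ih.2, ht]
        simp

-- scanner = A's any() over lines, Str level, for a good prefix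
theorem pvStartsLine_eq (content : String) (p : String)
    (a : Char) (q : List Char) (hp : p.toList = a :: q)
    (ha : PySem.Chars.isspace a = false) (hnl : '\n' ∉ a :: q)
    (hlast : PySem.Chars.isspace ((a :: q).getLast (by simp)) = false) :
    pvStartsLine content p
      = ((PySem.Str.split? content "\n").getD []).any
          (fun line => PySem.Str.startswith (PySem.Str.strip line) p) := by
  rw [pvALines_eq, pvStartsLine, hp, (pvScan_eq a q ha hnl hlast content.toList).1]
  rw [List.any_map]
  apply PySem.List.any_congr_mem
  intro l _
  simp [Function.comp, PySem.Str.startswith, PySem.Str.strip, pvP, hp, String.toList_ofList]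

theorem pvAny_or (L : List String) (f g : String → Bool) :
    L.any (fun x => f x || g x) = (L.any f || L.any g) := by
  induction L with
  | nil => rfl
  | cons x xs ih => simp [List.any_cons, ih]; ac_rfl

-- ===== VERDICT (by name: the statement is the Claim_ definition above) =====
theorem detect_corruption_pattern_spec : Claim_equal_detect_corruption_pattern := by
  intro content error_msg _
  simp only [Spec_detect_corruption_pattern, detect_corruption_pattern,
    detect_corruption_pattern_alt, pvATail]
  have hstep : ((PySem.Str.split? content "\n").getD []).any pvAStep
      = (pvStartsLine content "- uses:" || pvStartsLine content "- run:" ||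
         pvStartsLine content "- with:") := by
    unfold pvAStep
    rw [pvAny_or, pvAny_or,
      pvStartsLine_eq content "- uses:" '-' " uses:".toList rfl (by decide) (by decide) (by decide),
      pvStartsLine_eq content "- run:" '-' " run:".toList rfl (by decide) (by decide) (by decide),
      pvStartsLine_eq content "- with:" '-' " with:".toList rfl (by decide) (by decide) (by decide)]
  have hbare : ((PySem.Str.split? content "\n").getD []).any pvABare
      = (pvStartsLine content "uses:" || pvStartsLine content "run:" ||
         pvStartsLine content "with:") := by
    unfold pvABare
    rw [pvAny_or, pvAny_or,
      pvStartsLine_eq content "uses:" 'u' "ses:".toList rfl (by decide) (by decide) (by decide),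
      pvStartsLine_eq content "run:" 'r' "un:".toList rfl (by decide) (by decide) (by decide),
      pvStartsLine_eq content "with:" 'w' "ith:".toList rfl (by decide) (by decide) (by decide)]
  have hjob : ((PySem.Str.split? content "\n").getD []).any pvAJob
      = (pvStartsLine content "- runs-on:" || pvStartsLine content "- timeout-minutes:" ||
         pvStartsLine content "- needs:") := by
    unfold pvAJob
    rw [pvAny_or, pvAny_or,
      pvStartsLine_eq content "- runs-on:" '-' " runs-on:".toList rfl (by decide) (by decide) (by decide),
      pvStartsLine_eq content "- timeout-minutes:" '-' " timeout-minutes:".toList rfl (by decide) (by decide) (by decide),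
      pvStartsLine_eq content "- needs:" '-' " needs:".toList rfl (by decide) (by decide) (by decide)]
  have hindent : ((PySem.Str.split? content "\n").getD []).any pvAIndent = false := by
    rw [pvALines_eq, List.any_map]
    refine List.any_eq_false.mpr ?_
    intro l _
    simpa [Function.comp, pvAIndent, PySem.Str.startswith, PySem.Str.strip,
      String.toList_ofList] using pvIndent_false l
  rw [hstep, hbare, hjob, hindent]
  simp only [Bool.not_false, if_true]
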